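-- pv_equiv track=rewrite | github.com/joac001/TP-TDA | TP3/backtracking/utils.py | posiciones_para_barco_por_fila
-- ===== SOURCE A (Python) =====
-- def posiciones_para_barco_por_fila(columnas_disponibles, f, k, todas = True):
--     if len(columnas_disponibles) < k:
--         return []
--
--     casilleros = []
--     for c in columnas_disponibles:
--         casilleros.append((f, c))
--
--     posiciones = []
--     for i in range(len(casilleros) - k + 1):
--         son_consecutivos = True
--         consecutivos = []
--         for j in range(k):
--             actual = casilleros[i + j]
--             consecutivos.append(actual)
--             if j >= k - 1:
--                 continue
--
--             siguiente = casilleros[i + j + 1]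
--             if actual[1] + 1 != siguiente[1]:
--                 son_consecutivos = False
--
--         if son_consecutivos:
--             posiciones.append(consecutivos.copy())
--
--             if not todas:
--                 # Devolvemos una sola posicion.
--                 return posiciones
--         son_consecutivos = False
--
--     return posiciones
-- ===== SOURCE B (Python) =====
-- def posiciones_para_barco_por_fila(columnas_disponibles, f, k, todas=True):
--     posiciones = []
--     run = 0
--     prev = None
--     for i, c in enumerate(columnas_disponibles):
--         run = run + 1 if prev is not None and prev + 1 == c else 1
--         prev = c
--         if run >= k:
--             posiciones.append([(f, col) for col in columnas_disponibles[i - k + 1:i + 1]])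
--             if not todas:
--                 return posiciones
--     return posiciones
-- ===== Notes on version B (the rewrite author's own statement) =====
-- stated objective: faster
-- what changed: Replaces A's O(n*k) nested scan (re-checking consecutiveness of every k-window from scratch) by a single pass that maintains a running consecutive-run counter and emits a window, built once in O(k), exactly when the run reaches k.
-- outside the precondition, e.g. on posiciones_para_barco_por_fila([1, 2, 3], 0, 0, True): A returns [[], [], [], []], B returns [[], [], []]
import Mathlib
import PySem

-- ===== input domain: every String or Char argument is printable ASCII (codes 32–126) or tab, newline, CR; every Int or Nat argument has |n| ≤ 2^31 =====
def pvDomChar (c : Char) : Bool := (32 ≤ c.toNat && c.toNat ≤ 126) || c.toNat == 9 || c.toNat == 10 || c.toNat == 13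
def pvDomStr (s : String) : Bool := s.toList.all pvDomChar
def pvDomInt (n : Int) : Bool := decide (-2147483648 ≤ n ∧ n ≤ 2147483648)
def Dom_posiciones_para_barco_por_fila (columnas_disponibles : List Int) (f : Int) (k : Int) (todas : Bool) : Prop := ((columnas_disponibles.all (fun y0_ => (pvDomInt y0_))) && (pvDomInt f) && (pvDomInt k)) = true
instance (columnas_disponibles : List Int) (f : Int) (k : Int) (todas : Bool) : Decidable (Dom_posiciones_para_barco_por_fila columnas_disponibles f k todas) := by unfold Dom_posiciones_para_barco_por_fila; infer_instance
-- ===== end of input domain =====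

-- B replaces A's window-by-window re-check by a single pass with a running consecutive-run
-- counter (objective: faster). Return values only; neither program mutates its arguments.

-- ===== PORT A =====
-- inner `for j in range(k)` loop of A: state = (son_consecutivos, consecutivos).
-- pyGetD is exact here: under Pre_ (1 ≤ k) every index this loop reaches is in range,
-- and for k ≤ 0 the loop body never runs, so Python raises nowhere.
def pvAInner (casilleros : List (Int × Int)) (k : Int) (i : Int) : Bool × List (Int × Int) :=
  (PySem.List.pyRange 0 k 1).foldl
    (fun st j =>
      let actual := PySem.List.pyGetD casilleros (i + j) (0, 0)
      let consecutivos := st.2 ++ [actual]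
      if j ≥ k - 1 then (st.1, consecutivos)
      else
        let siguiente := PySem.List.pyGetD casilleros (i + j + 1) (0, 0)
        if actual.2 + 1 ≠ siguiente.2 then (false, consecutivos)
        else (st.1, consecutivos))
    (true, [])

-- outer `for i in range(len(casilleros) - k + 1)` loop with A's early `return` when `not todas`
def pvAOuter (casilleros : List (Int × Int)) (k : Int) (todas : Bool) :
    List Int → List (List (Int × Int)) → List (List (Int × Int))
  | [], posiciones => posiciones
  | i :: rest, posiciones =>
    let r := pvAInner casilleros k i
    if r.1 then
      let posiciones' := posiciones ++ [r.2]
      if !todas then posiciones'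
      else pvAOuter casilleros k todas rest posiciones'
    else pvAOuter casilleros k todas rest posiciones

def posiciones_para_barco_por_fila (columnas_disponibles : List Int) (f : Int) (k : Int) (todas : Bool) : List (List (Int × Int)) :=
  if PySem.List.len columnas_disponibles < k then []
  else
    let casilleros := columnas_disponibles.foldl (fun acc c => acc ++ [(f, c)]) []
    pvAOuter casilleros k todas
      (PySem.List.pyRange 0 (PySem.List.len casilleros - k + 1) 1) []

-- ===== PORT B =====
-- B's single `for i, c in enumerate(columnas_disponibles)` loop: running run-length counter,
-- window built by slicing only when the counter reaches k, early return when `not todas`.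
def pvBLoop (columnas_disponibles : List Int) (f : Int) (k : Int) (todas : Bool) :
    List (Int × Int) → Option Int → Int → List (List (Int × Int)) → List (List (Int × Int))
  | [], _, _, posiciones => posiciones
  | (i, c) :: rest, prev, run, posiciones =>
    let run' := match prev with
      | some p => if p + 1 = c then run + 1 else 1
      | none => 1
    if run' ≥ k then
      let w := (PySem.List.slice columnas_disponibles (some (i - k + 1)) (some (i + 1))).map
        (fun col => (f, col))
      let posiciones' := posiciones ++ [w]
      if !todas then posiciones'
      else pvBLoop columnas_disponibles f k todas rest (some c) run' posiciones'
    else pvBLoop columnas_disponibles f k todas rest (some c) run' posiciones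

def posiciones_para_barco_por_fila_alt (columnas_disponibles : List Int) (f : Int) (k : Int) (todas : Bool) : List (List (Int × Int)) :=
  pvBLoop columnas_disponibles f k todas
    (PySem.List.enumerate columnas_disponibles 0) none 0 []

-- ===== PRECONDITION & SPEC =====
-- Pre_ excludes k ≤ 0, on which A still returns: there both programs emit only degenerate
-- empty windows, and the number A emits (len - k + 1 of them, even exceeding len for k < 0)
-- is an accident of its range arithmetic — a corner no caller of a ship-placement helper
-- specifies; B emits one empty window per element there.
def Pre_posiciones_para_barco_por_fila (columnas_disponibles : List Int) (f : Int) (k : Int) (todas : Bool) : Prop := 1 ≤ k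
instance (columnas_disponibles : List Int) (f : Int) (k : Int) (todas : Bool) : Decidable (Pre_posiciones_para_barco_por_fila columnas_disponibles f k todas) := by unfold Pre_posiciones_para_barco_por_fila; infer_instance

def pvWitness_posiciones_para_barco_por_fila : List Int × Int × Int × Bool := ([1, 2, 4, 5, 6], 0, 2, true)

def Spec_posiciones_para_barco_por_fila (columnas_disponibles : List Int) (f : Int) (k : Int) (todas : Bool) (out : List (List (Int × Int))) : Prop := out = posiciones_para_barco_por_fila_alt columnas_disponibles f k todas
instance (columnas_disponibles : List Int) (f : Int) (k : Int) (todas : Bool) (out : List (List (Int × Int))) : Decidable (Spec_posiciones_para_barco_por_fila columnas_disponibles f k todas out) := by unfold Spec_posiciones_para_barco_por_fila; infer_instance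

-- ===== CLAIM (what is proved, stated in full; the proofs are below) =====
def Claim_equal_posiciones_para_barco_por_fila : Prop := ∀ (columnas_disponibles : List Int) (f : Int) (k : Int) (todas : Bool), Dom_posiciones_para_barco_por_fila columnas_disponibles f k todas → Pre_posiciones_para_barco_por_fila columnas_disponibles f k todas → Spec_posiciones_para_barco_por_fila columnas_disponibles f k todas (posiciones_para_barco_por_fila columnas_disponibles f k todas)

-- ===== LEMMAS AND PROOFS =====

-- proof-side vocabulary: window segments, their consecutiveness, and the run-length counter
def pvChainOk : List Int → Bool
  | [] => true
  | [_] => true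
  | a :: b :: rest => (a + 1 == b) && pvChainOk (b :: rest)

def pvSeg (cols : List Int) (s K : Nat) : List Int := (cols.drop s).take K

def pvWin (cols : List Int) (f : Int) (s K : Nat) : List (Int × Int) :=
  (pvSeg cols s K).map (fun c => (f, c))

def pvOk (cols : List Int) (K s : Nat) : Bool := pvChainOk (pvSeg cols s K)

-- run length of the maximal consecutive suffix of the first p elements
def pvR (cols : List Int) : Nat → Nat
  | 0 => 0
  | p + 1 => if 1 ≤ p ∧ cols.getD (p - 1) 0 + 1 = cols.getD p 0 then pvR cols p + 1 else 1

def pvSel (todas : Bool) (l : List (List (Int × Int))) : List (List (Int × Int)) :=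
  if todas then l else l.take 1

-- positions at which B's counter fires, from index p on
def pvE (cols : List Int) (K p : Nat) : List Nat :=
  (List.range' p (cols.length - p)).filter (fun i => K ≤ pvR cols (i + 1))

theorem pvChainOk_snoc : ∀ (l : List Int) (y : Int),
    pvChainOk (l ++ [y]) = (pvChainOk l &&
      (match l.getLast? with | some x => x + 1 == y | none => true))
  | [], y => by simp [pvChainOk]
  | [a], y => by simp [pvChainOk]
  | a :: b :: rest, y => by
    have ih := pvChainOk_snoc (b :: rest) y
    simp only [List.cons_append, pvChainOk, List.getLast?_cons_cons] at ih ⊢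
    rw [ih, Bool.and_assoc]

theorem pvR_pos (cols : List Int) (p : Nat) : 1 ≤ pvR cols (p + 1) := by
  rw [pvR]; split <;> omega

theorem pvR_le (cols : List Int) : ∀ (p : Nat), pvR cols p ≤ p
  | 0 => le_refl _
  | p + 1 => by
    rw [pvR]; split
    · exact Nat.add_le_add_right (pvR_le cols p) 1
    · omega

theorem pvSeg_cons (cols : List Int) (s j : Nat) (hs : s < cols.length) :
    pvSeg cols s (j + 1) = cols.getD s 0 :: pvSeg cols (s + 1) j := by
  unfold pvSeg
  rw [List.drop_eq_getElem_cons hs, List.take_succ_cons, List.getD_eq_getElem cols 0 hs]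

theorem pvOk_one (cols : List Int) (s : Nat) (h : s < cols.length) : pvOk cols 1 s = true := by
  unfold pvOk pvSeg
  rw [List.drop_eq_getElem_cons h]
  rfl

theorem pvOk_succ (cols : List Int) (K p : Nat) (h2 : 2 ≤ K) (hK : K ≤ p + 1)
    (hp : p < cols.length) :
    pvOk cols K (p + 1 - K) =
      (pvOk cols (K - 1) (p - (K - 1)) && (cols.getD (p - 1) 0 + 1 == cols.getD p 0)) := by
  obtain ⟨m, rfl⟩ : ∃ m, K = m + 2 := ⟨K - 2, by omega⟩
  have hs2 : p + 1 - (m + 2) = p - (m + 1) := by omega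
  have hs3 : m + 2 - 1 = m + 1 := by omega
  rw [hs2, hs3]
  set s := p - (m + 1) with hsdef
  have hsp : s + (m + 1) = p := by omega
  unfold pvOk pvSeg
  rw [List.take_add_one]
  have hidx : (cols.drop s)[m + 1]? = some (cols.getD p 0) := by
    rw [List.getElem?_drop, show s + (m + 1) = p from hsp, List.getElem?_eq_getElem hp,
      List.getD_eq_getElem cols 0 hp]
  rw [hidx]
  have hlast : ((cols.drop s).take (m + 1)).getLast? = some (cols.getD (p - 1) 0) := by
    rw [List.getLast?_eq_getElem?]
    have hl : ((cols.drop s).take (m + 1)).length = m + 1 := by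
      rw [List.length_take, List.length_drop]; omega
    rw [hl]
    have hmm : m + 1 - 1 = m := by omega
    rw [hmm]
    rw [List.getElem?_take_of_lt (by omega), List.getElem?_drop,
      show s + m = p - 1 by omega]
    have hplt : p - 1 < cols.length := by omega
    rw [List.getElem?_eq_getElem hplt, List.getD_eq_getElem cols 0 hplt]
  rw [Option.toList_some, pvChainOk_snoc, hlast]

theorem pvR_iff (cols : List Int) : ∀ (p : Nat) (K : Nat), 1 ≤ K → 1 ≤ p → p ≤ cols.length →
    ((K ≤ pvR cols p) ↔ (K ≤ p ∧ pvOk cols K (p - K) = true))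
  | 0, K, hK, hp, hn => by omega
  | 1, K, hK, hp, hn => by
    have h1 : pvR cols 1 = 1 := by rw [pvR]; simp
    rw [h1]
    constructor
    · intro h
      have hK1 : K = 1 := by omega
      subst hK1
      exact ⟨le_refl _, pvOk_one cols 0 (by omega)⟩
    · rintro ⟨h1', _⟩; omega
  | (p + 2), K, hK, hp, hn => by
    rw [pvR]
    by_cases hc : cols.getD p 0 + 1 = cols.getD (p + 1) 0
    · rw [if_pos (by constructor; omega; simpa using hc)]
      by_cases hK1 : K = 1
      · subst hK1
        have := pvR_pos cols p
        constructor
        · intro _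
          exact ⟨by omega, by rw [show p + 2 - 1 = p + 1 from rfl]; exact pvOk_one cols (p + 1) (by omega)⟩
        · intro _; omega
      · have h2 : 2 ≤ K := by omega
        have ih := pvR_iff cols (p + 1) (K - 1) (by omega) (by omega) (by omega)
        have hok := fun (hKle : K ≤ p + 2) => pvOk_succ cols K (p + 1) h2 hKle (by omega)
        constructor
        · intro h
          have h' : K - 1 ≤ pvR cols (p + 1) := by omega
          obtain ⟨hle, hokv⟩ := ih.mp h'
          refine ⟨by omega, ?_⟩
          rw [show p + 2 - K = p + 1 + 1 - K by omega, hok (by omega), show p + 1 - 1 = p by omega]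
          simp only [hokv, Bool.true_and, beq_iff_eq]
          simpa [List.getD] using hc
        · rintro ⟨hle, hokv⟩
          rw [show p + 2 - K = p + 1 + 1 - K by omega, hok hle] at hokv
          simp only [Bool.and_eq_true] at hokv
          have := ih.mpr ⟨by omega, hokv.1⟩
          omega
    · rw [if_neg (by rintro ⟨-, h⟩; exact hc (by simpa using h))]
      by_cases hK1 : K = 1
      · subst hK1
        constructor
        · intro _
          exact ⟨by omega, by rw [show p + 2 - 1 = p + 1 from rfl]; exact pvOk_one cols (p + 1) (by omega)⟩
        · intro _; omega
      · have h2 : 2 ≤ K := by omega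
        constructor
        · intro h; omega
        · rintro ⟨hle, hokv⟩
          exfalso
          rw [show p + 2 - K = p + 1 + 1 - K by omega,
            pvOk_succ cols K (p + 1) h2 hle (by omega), show p + 1 - 1 = p by omega] at hokv
          simp only [Bool.and_eq_true, beq_iff_eq] at hokv
          exact hc hokv.2

-- the step function of A's inner fold, named so the fold lemma matches the port
def pvStepA (casilleros : List (Int × Int)) (k i : Int)
    (st : Bool × List (Int × Int)) (j : Int) : Bool × List (Int × Int) :=
  let actual := PySem.List.pyGetD casilleros (i + j) (0, 0)
  let consecutivos := st.2 ++ [actual]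
  if j ≥ k - 1 then (st.1, consecutivos)
  else
    let siguiente := PySem.List.pyGetD casilleros (i + j + 1) (0, 0)
    if actual.2 + 1 ≠ siguiente.2 then (false, consecutivos)
    else (st.1, consecutivos)

theorem pvAInner_eq_foldl (casilleros : List (Int × Int)) (k i : Int) :
    pvAInner casilleros k i =
      (PySem.List.pyRange 0 k 1).foldl (pvStepA casilleros k i) (true, []) := rfl

theorem pvGet_map (cols : List Int) (f : Int) (j : Nat) (hj : j < cols.length) :
    PySem.List.pyGetD (cols.map (fun c => (f, c))) ((j : Nat) : Int) ((0 : Int), (0 : Int)) =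
      (f, cols.getD j 0) := by
  rw [PySem.List.pyGetD_natCast]
  rw [List.getD_eq_getElem _ _ (by simpa using hj), List.getElem_map,
    List.getD_eq_getElem cols 0 hj]

theorem pvAInner_aux (cols : List Int) (f k : Int) (K s : Nat) (hk : 1 ≤ k)
    (hK : K = k.toNat) (hs : s + K ≤ cols.length) :
    ∀ (d : Nat), d ≤ K → ∀ (b : Bool) (acc : List (Int × Int)),
    (PySem.List.pyRange ((K - d : Nat) : Int) k 1).foldl
        (pvStepA (cols.map (fun c => (f, c))) k (s : Int)) (b, acc)
    = (b && pvChainOk (pvSeg cols (s + (K - d)) d), acc ++ pvWin cols f (s + (K - d)) d) := by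
  have hKk : (K : Int) = k := by omega
  intro d
  induction d with
  | zero =>
    intro _ b acc
    rw [Nat.sub_zero, PySem.List.pyRange_one_eq_nil (by omega)]
    simp [pvSeg, pvWin, pvChainOk]
  | succ d ih =>
    intro hd b acc
    set m := K - (d + 1) with hm
    have hmK : m < K := by omega
    have hmn : s + m < cols.length := by omega
    have hKd : K - d = m + 1 := by omega
    have ih' : ∀ (b : Bool) (acc : List (Int × Int)),
        (PySem.List.pyRange ((m : Int) + 1) k 1).foldl
            (pvStepA (cols.map (fun c => (f, c))) k (s : Int)) (b, acc)
        = (b && pvChainOk (pvSeg cols (s + (m + 1)) d), acc ++ pvWin cols f (s + (m + 1)) d) := by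
      intro b acc
      have h := ih (by omega) b acc
      rw [hKd] at h
      push_cast at h ⊢
      exact h
    rw [PySem.List.pyRange_one_cons (by omega), List.foldl_cons]
    have hcast : (s : Int) + (m : Int) = ((s + m : Nat) : Int) := by push_cast; ring
    set c0 := cols.getD (s + m) 0 with hc0
    by_cases hd0 : d = 0
    · subst hd0
      have hstep : pvStepA (cols.map (fun c => (f, c))) k (s : Int) (b, acc) (m : Int) =
          (b, acc ++ [(f, c0)]) := by
        unfold pvStepA
        rw [hcast, pvGet_map cols f (s + m) hmn]
        rw [if_pos (by omega : (m : Int) ≥ k - 1)]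
      rw [hstep, ih' b (acc ++ [(f, c0)])]
      refine Prod.ext ?_ ?_
      · show (b && pvChainOk (pvSeg cols (s + (m + 1)) 0)) = (b && pvChainOk (pvSeg cols (s + m) (0 + 1)))
        rw [pvSeg_cons cols (s + m) 0 hmn]
        simp [pvSeg, pvChainOk, ← List.getD_eq_getElem?_getD, ← hc0]
      · show acc ++ [(f, c0)] ++ pvWin cols f (s + (m + 1)) 0 = acc ++ pvWin cols f (s + m) (0 + 1)
        unfold pvWin
        rw [pvSeg_cons cols (s + m) 0 hmn]
        simp [pvSeg, ← List.getD_eq_getElem?_getD, ← hc0]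
    · have hm1n : s + m + 1 < cols.length := by omega
      have hcast2 : (s : Int) + (m : Int) + 1 = ((s + m + 1 : Nat) : Int) := by push_cast; ring
      set c1 := cols.getD (s + m + 1) 0 with hc1
      obtain ⟨d', rfl⟩ : ∃ d', d = d' + 1 := ⟨d - 1, by omega⟩
      have hseg1 : pvSeg cols (s + m) (d' + 1 + 1) = c0 :: pvSeg cols (s + m + 1) (d' + 1) := by
        rw [pvSeg_cons cols (s + m) (d' + 1) hmn]
      have hseg2 : pvSeg cols (s + m + 1) (d' + 1) = c1 :: pvSeg cols (s + m + 1 + 1) d' := by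
        rw [pvSeg_cons cols (s + m + 1) d' hm1n]
      have hwin : acc ++ [(f, c0)] ++ pvWin cols f (s + (m + 1)) (d' + 1) =
          acc ++ pvWin cols f (s + m) (d' + 1 + 1) := by
        unfold pvWin
        rw [show s + (m + 1) = s + m + 1 by omega, hseg1]
        simp
      by_cases hcc : c0 + 1 = c1
      · have hstep : pvStepA (cols.map (fun c => (f, c))) k (s : Int) (b, acc) (m : Int) =
            (b, acc ++ [(f, c0)]) := by
          unfold pvStepA
          rw [hcast2, hcast, pvGet_map cols f (s + m) hmn, pvGet_map cols f (s + m + 1) hm1n]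
          rw [if_neg (by omega : ¬ ((m : Int) ≥ k - 1)), if_neg (by simp [← List.getD_eq_getElem?_getD, ← hc0, ← hc1, hcc])]
        rw [hstep, ih' b (acc ++ [(f, c0)])]
        refine Prod.ext ?_ hwin
        show (b && pvChainOk (pvSeg cols (s + (m + 1)) (d' + 1))) =
          (b && pvChainOk (pvSeg cols (s + m) (d' + 1 + 1)))
        rw [show s + (m + 1) = s + m + 1 by omega, hseg1, hseg2]
        show _ = (b && ((c0 + 1 == c1) && pvChainOk (c1 :: pvSeg cols (s + m + 1 + 1) d')))
        simp [hcc]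
      · have hstep : pvStepA (cols.map (fun c => (f, c))) k (s : Int) (b, acc) (m : Int) =
            (false, acc ++ [(f, c0)]) := by
          unfold pvStepA
          rw [hcast2, hcast, pvGet_map cols f (s + m) hmn, pvGet_map cols f (s + m + 1) hm1n]
          rw [if_neg (by omega : ¬ ((m : Int) ≥ k - 1)), if_pos (by simp [← List.getD_eq_getElem?_getD, ← hc0, ← hc1, hcc])]
        rw [hstep, ih' false (acc ++ [(f, c0)])]
        refine Prod.ext ?_ hwin
        show (false && pvChainOk (pvSeg cols (s + (m + 1)) (d' + 1))) =
          (b && pvChainOk (pvSeg cols (s + m) (d' + 1 + 1)))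
        rw [show s + (m + 1) = s + m + 1 by omega, hseg1, hseg2]
        show _ = (b && ((c0 + 1 == c1) && pvChainOk (c1 :: pvSeg cols (s + m + 1 + 1) d')))
        simp [hcc]

theorem pvAInner_eq (cols : List Int) (f k : Int) (K s : Nat) (hk : 1 ≤ k)
    (hK : K = k.toNat) (hs : s + K ≤ cols.length) :
    pvAInner (cols.map (fun c => (f, c))) k (s : Int) = (pvOk cols K s, pvWin cols f s K) := by
  have h := pvAInner_aux cols f k K s hk hK hs K (le_refl K) true []
  rw [Nat.sub_self] at h
  rw [pvAInner_eq_foldl]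
  rw [show ((0 : Nat) : Int) = (0 : Int) from rfl] at h
  rw [h]
  simp [pvOk]

-- outer loop of A over an arbitrary list of start indices
theorem pvAOuter_eq (cols : List Int) (f k : Int) (K : Nat) (todas : Bool)
    (hk : 1 ≤ k) (hK : K = k.toNat) :
    ∀ (ss : List Int) (pos : List (List (Int × Int))),
    (∀ s ∈ ss, 0 ≤ s ∧ s.toNat + K ≤ cols.length) →
    pvAOuter (cols.map (fun c => (f, c))) k todas ss pos =
      pos ++ pvSel todas
        ((ss.filter (fun s => pvOk cols K s.toNat)).map (fun s => pvWin cols f s.toNat K))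
  | [], pos, _ => by simp [pvAOuter, pvSel]
  | s :: rest, pos, hss => by
    obtain ⟨hs0, hsn⟩ := hss s (by simp)
    have hinner : pvAInner (cols.map (fun c => (f, c))) k s =
        (pvOk cols K s.toNat, pvWin cols f s.toNat K) := by
      rw [show s = ((s.toNat : Nat) : Int) by omega]
      exact pvAInner_eq cols f k K s.toNat hk hK hsn
    have hrest := fun pos => pvAOuter_eq cols f k K todas hk hK rest pos
      (fun x hx => hss x (List.mem_cons_of_mem _ hx))
    by_cases hok : pvOk cols K s.toNat = true
    · rw [List.filter_cons_of_pos (by simpa using hok)]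
      cases todas with
      | false =>
        simp only [pvAOuter, hinner, hok, if_true, Bool.not_false]
        simp [pvSel]
      | true =>
        simp only [pvAOuter, hinner, hok, if_true, Bool.not_true,
          if_neg (Bool.false_ne_true)]
        rw [hrest (pos ++ [pvWin cols f s.toNat K])]
        simp [pvSel]
    · rw [List.filter_cons_of_neg (p := fun s => pvOk cols K s.toNat) (a := s) (l := rest) hok]
      simp only [pvAOuter, hinner]
      rw [if_neg hok]
      exact hrest pos

-- single pass of B: the counter carried by pvBLoop is pvR, and it fires exactly on pvE
theorem pvBLoop_eq (cols : List Int) (f k : Int) (K : Nat) (todas : Bool)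
    (hk : 1 ≤ k) (hK : K = k.toNat) :
    ∀ (d p : Nat), p + d = cols.length →
    ∀ (pos : List (List (Int × Int))),
    pvBLoop cols f k todas (PySem.List.enumerate (cols.drop p) (p : Int))
        (if p = 0 then none else some (cols.getD (p - 1) 0)) ((pvR cols p : Nat) : Int) pos =
      pos ++ pvSel todas ((pvE cols K p).map (fun i => pvWin cols f (i + 1 - K) K)) := by
  intro d
  induction d with
  | zero =>
    intro p hp pos
    rw [List.drop_of_length_le (by omega), PySem.List.enumerate_nil, pvBLoop, pvE,
      show cols.length - p = 0 by omega]
    simp [pvSel]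
  | succ d ih =>
    intro p hp pos
    have hpn : p < cols.length := by omega
    rw [List.drop_eq_getElem_cons hpn, PySem.List.enumerate_cons]
    set c := cols[p] with hc
    have hgc : cols.getD p 0 = c := List.getD_eq_getElem cols 0 hpn
    -- the updated run counter is pvR cols (p+1)
    have hrun : (match (if p = 0 then none else some (cols.getD (p - 1) 0)) with
        | some q => if q + 1 = c then ((pvR cols p : Nat) : Int) + 1 else 1
        | none => (1 : Int)) = ((pvR cols (p + 1) : Nat) : Int) := by
      by_cases hp0 : p = 0
      · subst hp0
        simp [pvR]
      · rw [if_neg hp0]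
        show (if cols.getD (p - 1) 0 + 1 = c then ((pvR cols p : Nat) : Int) + 1 else 1) = _
        rw [pvR]
        by_cases hstep : cols.getD (p - 1) 0 + 1 = cols.getD p 0
        · rw [if_pos (by rw [← hgc]; exact hstep), if_pos ⟨by omega, hstep⟩]
          push_cast; ring
        · rw [if_neg (by rw [← hgc]; exact hstep), if_neg (by rintro ⟨-, h⟩; exact hstep h)]
          rfl
    have hE : pvE cols K p = if K ≤ pvR cols (p + 1) then p :: pvE cols K (p + 1)
        else pvE cols K (p + 1) := by
      rw [pvE, show cols.length - p = (cols.length - (p + 1)) + 1 by omega, List.range'_succ,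
        List.filter_cons]
      by_cases h1 : K ≤ pvR cols (p + 1)
      · rw [if_pos (by simpa using h1), if_pos h1, pvE]
      · rw [if_neg (by simpa using h1), if_neg h1, pvE]
    simp only [pvBLoop, hrun]
    by_cases hemit : K ≤ pvR cols (p + 1)
    · rw [if_pos (by push_cast; omega)]
      have hKp : K ≤ p + 1 := le_trans hemit (pvR_le cols (p + 1))
      have hw : (PySem.List.slice cols (some ((p : Int) - k + 1)) (some ((p : Int) + 1))).map
          (fun col => (f, col)) = pvWin cols f (p + 1 - K) K := by
        rw [show (p : Int) - k + 1 = ((p + 1 - K : Nat) : Int) by omega,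
          show (p : Int) + 1 = ((p + 1 : Nat) : Int) by omega,
          PySem.List.slice_natCast]
        rw [show p + 1 - (p + 1 - K) = K by omega]
        rfl
      rw [hw, hE, if_pos hemit]
      cases todas with
      | false => simp [pvSel]
      | true =>
        rw [if_neg (by simp)]
        rw [show ((p : Int)) + 1 = (((p + 1 : Nat)) : Int) by omega]
        rw [show (some c : Option Int) =
          (if p + 1 = 0 then none else some (cols.getD (p + 1 - 1) 0)) by
            rw [if_neg (Nat.succ_ne_zero p), show p + 1 - 1 = p from rfl, hgc]]
        rw [ih (p + 1) (by omega) (pos ++ [pvWin cols f (p + 1 - K) K])]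
        simp [pvSel]
    · rw [if_neg (by push_cast; omega)]
      rw [hE, if_neg hemit]
      rw [show ((p : Int)) + 1 = (((p + 1 : Nat)) : Int) by omega]
      rw [show (some c : Option Int) =
        (if p + 1 = 0 then none else some (cols.getD (p + 1 - 1) 0)) by
          rw [if_neg (Nat.succ_ne_zero p), show p + 1 - 1 = p from rfl, hgc]]
      exact ih (p + 1) (by omega) pos

theorem pvE_zero_small (cols : List Int) (K : Nat) (h : cols.length < K) :
    pvE cols K 0 = [] := by
  rw [pvE, List.filter_eq_nil_iff]
  intro i hi
  rw [List.mem_range'_1] at hi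
  have := pvR_le cols (i + 1)
  simp only [decide_eq_true_eq]
  omega

theorem pvE_zero (cols : List Int) (K : Nat) (hK : 1 ≤ K) (h : K ≤ cols.length) :
    pvE cols K 0 =
      ((List.range (cols.length - K + 1)).filter (fun s => pvOk cols K s)).map
        (fun s => (K - 1) + s) := by
  rw [pvE, Nat.sub_zero]
  conv_lhs => rw [show cols.length = (K - 1) + (cols.length - K + 1) by omega,
    ← List.range'_append, List.filter_append]
  have h1 : (List.range' 0 (K - 1)).filter (fun i => decide (K ≤ pvR cols (i + 1))) = [] := by
    rw [List.filter_eq_nil_iff]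
    intro i hi
    rw [List.mem_range'_1] at hi
    have := pvR_le cols (i + 1)
    simp only [decide_eq_true_eq]
    omega
  rw [h1, List.nil_append, Nat.zero_add, List.range'_eq_map_range, List.filter_map]
  simp only [one_mul]
  have h2 : ∀ s ∈ List.range (cols.length - K + 1),
      ((fun i => decide (K ≤ pvR cols (i + 1))) ∘ (fun x => (K - 1) + x)) s
        = pvOk cols K s := by
    intro s hs
    rw [List.mem_range] at hs
    have hiff := pvR_iff cols ((K - 1) + s + 1) K hK (by omega) (by omega)
    rw [show (K - 1) + s + 1 - K = s by omega] at hiff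
    simp only [Function.comp_apply]
    cases hok : pvOk cols K s with
    | true => exact decide_eq_true (hiff.mpr ⟨by omega, hok⟩)
    | false =>
      apply decide_eq_false
      intro hcontr
      have h2' := (hiff.mp hcontr).2
      rw [hok] at h2'
      simp at h2'
  rw [List.filter_congr h2]

-- ===== VERDICT (by name: the statement is the Claim_ definition above) =====
theorem posiciones_para_barco_por_fila_spec : Claim_equal_posiciones_para_barco_por_fila := by
  intro cols f k todas _ hpre
  have hk : 1 ≤ k := hpre
  unfold Spec_posiciones_para_barco_por_fila
  unfold posiciones_para_barco_por_fila posiciones_para_barco_por_fila_alt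
  set K := k.toNat with hKdef
  have hKk : (K : Int) = k := by omega
  have hB : pvBLoop cols f k todas (PySem.List.enumerate cols 0) none 0 [] =
      pvSel todas ((pvE cols K 0).map (fun i => pvWin cols f (i + 1 - K) K)) := by
    have h := pvBLoop_eq cols f k K todas hk hKdef cols.length 0 (by omega) []
    rw [List.drop_zero] at h
    simpa using h
  rw [hB]
  by_cases hlen : PySem.List.len cols < k
  · rw [if_pos hlen]
    rw [PySem.List.len_eq] at hlen
    rw [pvE_zero_small cols K (by omega)]
    simp [pvSel]
  · rw [if_neg hlen]
    rw [PySem.List.len_eq] at hlen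
    have hnK : K ≤ cols.length := by omega
    show pvAOuter (cols.foldl (fun acc c => acc ++ [(f, c)]) []) k todas
        (PySem.List.pyRange 0
          (PySem.List.len (cols.foldl (fun acc c => acc ++ [(f, c)]) []) - k + 1) 1) [] = _
    rw [show cols.foldl (fun acc c => acc ++ [(f, c)]) [] = cols.map (fun c => (f, c)) by
      rw [PySem.List.foldl_append_singleton_eq_map]; rfl]
    rw [show PySem.List.len (cols.map (fun c => (f, c))) - k + 1
        = ((cols.length - K + 1 : Nat) : Int) by
      rw [PySem.List.len_eq, List.length_map]; omega]
    rw [PySem.List.pyRange_zero_natCast]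
    rw [pvAOuter_eq cols f k K todas hk hKdef _ []
      (by
        intro s hs
        simp only [List.mem_map, List.mem_range] at hs
        obtain ⟨i, hi, rfl⟩ := hs
        exact ⟨by positivity, by simp; omega⟩)]
    rw [List.nil_append, List.filter_map, List.map_map]
    rw [pvE_zero cols K (by omega) hnK, List.map_map]
    congr 1
    rw [List.filter_congr (by
      intro x hx
      simp only [Function.comp_apply, Int.toNat_natCast]
      rfl)]
    apply List.map_congr_left
    intro x hx
    simp only [Function.comp_apply, Int.toNat_natCast]
    rw [show (K - 1) + x + 1 - K = x by omega]
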